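-- pv_equiv track=rewrite | github.com/Mr-Harsh-Dixit/Project_Euler_Solutions | Python/Problem_103.py | rule1_disjoint
-- ===== SOURCE A (Python) =====
-- from typing import List, Dict
--
-- def rule1_disjoint(a: List[int]) -> bool:
--     n = len(a)
--     seen: Dict[int, int] = {}  # sum -> bitmask
--     # pre-store a for speed
--     for mask in range(1, 1 << n):
--         s = 0
--         m = mask
--         idx = 0
--         while m:
--             if m & 1:
--                 s += a[idx]
--             idx += 1
--             m >>= 1
--
--         prev = seen.get(s)
--         if prev is None:
--             seen[s] = mask
--         else:
--             if (prev & mask) == 0:  # disjoint subsets with equal sum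
--                 return False
--             # overlap: ignore
--     return True
-- ===== SOURCE B (Python) =====
-- def rule1_disjoint(a):
--     # Incremental DP over the subset-sum table: sums[mask] = sums[mask - highbit] + a[i],
--     # filled level by level (masks still visited in increasing order, same early exit),
--     # replacing A's per-mask bit-scan of the subset sum.
--     n = len(a)
--     sums = [0]
--     first = {}
--     for i in range(n):
--         x = a[i]
--         hb = 1 << i
--         for mask in range(hb, hb << 1):
--             s = sums[mask - hb] + x
--             sums.append(s)
--             prev = first.get(s)
--             if prev is None:
--                 first[s] = mask
--             elif prev & mask == 0:
--                 return False
--     return True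
-- ===== Notes on version B (the rewrite author's own statement) =====
-- stated objective: faster
-- what changed: B replaces A's per-mask while-loop over the bits by an incremental DP table (sums[mask] = sums[mask - highbit] + a[i], filled level by level), visiting the masks in the same order with the same first-occurrence dict check and early exit.
import Mathlib
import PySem

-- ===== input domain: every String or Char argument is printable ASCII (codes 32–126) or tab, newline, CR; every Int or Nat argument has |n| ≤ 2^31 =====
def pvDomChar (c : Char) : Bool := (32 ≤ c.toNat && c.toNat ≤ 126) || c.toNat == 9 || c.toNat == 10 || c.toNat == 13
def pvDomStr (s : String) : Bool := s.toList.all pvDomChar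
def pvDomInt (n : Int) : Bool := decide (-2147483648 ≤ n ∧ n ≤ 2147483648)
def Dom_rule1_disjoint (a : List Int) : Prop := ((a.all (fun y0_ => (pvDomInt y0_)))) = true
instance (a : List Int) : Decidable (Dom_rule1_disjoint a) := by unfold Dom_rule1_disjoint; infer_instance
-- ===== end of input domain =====

-- B replaces A's per-mask bit-scan of the subset sum by an incremental DP table
-- (sums[mask] = sums[mask - highbit] + a[i]), same mask order and dict scan.

-- ===== PORT A =====
-- the inner 'while m:' loop of A: s accumulated, idx the current bit position
def whileSum (a : List Int) (m idx : Nat) (s : Int) : Int :=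
  if m = 0 then s
  else whileSum a (m / 2) (idx + 1)
        (if m % 2 = 1 then s + PySem.List.pyGetD a (idx : Int) 0 else s)
termination_by m
decreasing_by exact Nat.div_lt_self (by omega) (by omega)

-- A's 'for mask in range(1, 1 << n)' loop with early return False
def loopA (a : List Int) : List Nat → PySem.Dict Int Nat → Bool
  | [], _ => true
  | mask :: rest, seen =>
    let s := whileSum a mask 0 0
    match seen.get? s with
    | none => loopA a rest (seen.insert s mask)
    | some prev => if prev &&& mask == 0 then false else loopA a rest seen

def rule1_disjoint (a : List Int) : Bool :=
  loopA a (List.range' 1 (2 ^ a.length - 1)) PySem.Dict.empty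

-- ===== PORT B =====
-- B's inner 'for mask in range(hb, hb << 1)' loop: appends sums[mask-hb]+x to the
-- table, does the first-occurrence dict check; 'none' signals 'return False'
def loopInner (x : Int) (hb : Nat) : List Nat → List Int → PySem.Dict Int Nat →
    Option (List Int × PySem.Dict Int Nat)
  | [], sums, first => some (sums, first)
  | mask :: rest, sums, first =>
    let s := sums.getD (mask - hb) 0 + x
    match first.get? s with
    | none => loopInner x hb rest (sums ++ [s]) (first.insert s mask)
    | some prev =>
      if prev &&& mask == 0 then none else loopInner x hb rest (sums ++ [s]) first

-- B's outer 'for i in range(n)' loop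
def loopOuter (a : List Int) : List Nat → List Int → PySem.Dict Int Nat → Bool
  | [], _, _ => true
  | i :: rest, sums, first =>
    match loopInner (PySem.List.pyGetD a (i : Int) 0) (2 ^ i)
        (List.range' (2 ^ i) (2 ^ i)) sums first with
    | none => false
    | some (sums', first') => loopOuter a rest sums' first'

def rule1_disjoint_alt (a : List Int) : Bool :=
  loopOuter a (List.range a.length) [0] PySem.Dict.empty

-- ===== PRECONDITION & SPEC =====
def Spec_rule1_disjoint (a : List Int) (out : Bool) : Prop := out = rule1_disjoint_alt a
instance (a : List Int) (out : Bool) : Decidable (Spec_rule1_disjoint a out) := by unfold Spec_rule1_disjoint; infer_instance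

-- ===== CLAIM (what is proved, stated in full; the proofs are below) =====
def Claim_equal_rule1_disjoint : Prop := ∀ (a : List Int), Dom_rule1_disjoint a → Spec_rule1_disjoint a (rule1_disjoint a)

-- ===== LEMMAS AND PROOFS =====

-- the subset sum selected by the bits of m over the list a
def bsum : List Int → Nat → Int
  | [], _ => 0
  | x :: xs, m => (if m % 2 = 1 then x else 0) + bsum xs (m / 2)

theorem bsum_zero (a : List Int) : bsum a 0 = 0 := by
  induction a with
  | nil => rfl
  | cons x xs ih => simp [bsum, ih]

theorem whileSum_eq (a : List Int) (m idx : Nat) (s : Int) :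
    whileSum a m idx s = s + bsum (a.drop idx) m := by
  induction m using Nat.strong_induction_on generalizing idx s with
  | _ m ih =>
    rw [whileSum]
    by_cases hm : m = 0
    · simp [hm, bsum_zero]
    · rw [if_neg hm, ih (m / 2) (Nat.div_lt_self (by omega) (by omega))]
      by_cases hidx : idx < a.length
      · rw [List.drop_eq_getElem_cons hidx]
        simp only [bsum]
        have : PySem.List.pyGetD a (idx : Int) 0 = a[idx] := by
          simp [PySem.List.pyGetD_natCast, List.getD_eq_getElem?_getD, hidx]
        rw [this]
        by_cases h2 : m % 2 = 1 <;> simp [h2] <;> ring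
      · have h1 : a.drop idx = [] := List.drop_eq_nil_of_le (by omega)
        have h2 : a.drop (idx + 1) = [] := List.drop_eq_nil_of_le (by omega)
        have h3 : PySem.List.pyGetD a (idx : Int) 0 = 0 := by
          rw [PySem.List.pyGetD_natCast]
          simp [List.getD_eq_getElem?_getD, List.getElem?_eq_none (by omega : a.length ≤ idx)]
        rw [h1, h2, h3]
        by_cases h2 : m % 2 = 1 <;> simp [h2, bsum]

-- the DP recurrence: adding the high bit i to mask r adds a[i] to the subset sum
theorem bsum_pow_add (i : Nat) : ∀ (r : Nat), r < 2 ^ i →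
    ∀ (xs : List Int), bsum xs (2 ^ i + r) = bsum xs r + xs.getD i 0 := by
  induction i with
  | zero =>
    intro r hr xs
    have : r = 0 := by omega
    subst this
    cases xs with
    | nil => simp [bsum]
    | cons x t => simp [bsum, bsum_zero]
  | succ i ih =>
    intro r hr xs
    have hpow : 2 ^ (i + 1) = 2 * 2 ^ i := by ring
    cases xs with
    | nil => simp [bsum]
    | cons x t =>
      have h2 : (2 ^ (i + 1) + r) % 2 = r % 2 := by omega
      have h3 : (2 ^ (i + 1) + r) / 2 = 2 ^ i + r / 2 := by omega
      have hr2 : r / 2 < 2 ^ i := by omega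
      rw [bsum, h2, h3, ih (r / 2) hr2 t, bsum]
      simp only [List.getD_cons_succ]
      ring

-- one level of B's inner loop agrees with A's scan over the same masks and keeps
-- the sums table correct
theorem inner_spec (a : List Int) (i : Nat) (j : Nat) : ∀ (k : Nat) (sums : List Int)
    (first : PySem.Dict Int Nat) (rest : List Nat),
    sums.length = 2 ^ i + k →
    k + j ≤ 2 ^ i →
    (∀ idx, idx < sums.length → sums.getD idx 0 = bsum a idx) →
    (loopA a (List.range' (2 ^ i + k) j ++ rest) first =
      (match loopInner (PySem.List.pyGetD a (i : Int) 0) (2 ^ i)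
          (List.range' (2 ^ i + k) j) sums first with
        | none => false
        | some (_, first') => loopA a rest first')) ∧
    (∀ sums' first', loopInner (PySem.List.pyGetD a (i : Int) 0) (2 ^ i)
        (List.range' (2 ^ i + k) j) sums first = some (sums', first') →
      sums'.length = 2 ^ i + (k + j) ∧
        ∀ idx, idx < sums'.length → sums'.getD idx 0 = bsum a idx) := by
  induction j with
  | zero =>
    intro k sums first rest hlen hk hcor
    constructor
    · simp [loopInner]
    · intro sums' first' h
      simp only [List.range'_zero, loopInner] at h
      cases h
      exact ⟨by omega, hcor⟩
  | succ j ih =>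
    intro k sums first rest hlen hk hcor
    have hmask : List.range' (2 ^ i + k) (j + 1) = (2 ^ i + k) :: List.range' (2 ^ i + k + 1) j := by
      rw [List.range'_succ]
    -- the value B computes for this mask
    have hxa : PySem.List.pyGetD a (i : Int) 0 = a.getD i 0 := by
      rw [PySem.List.pyGetD_natCast]
    have hs : sums.getD (2 ^ i + k - 2 ^ i) 0 + PySem.List.pyGetD a (i : Int) 0
        = bsum a (2 ^ i + k) := by
      have hk' : (2 ^ i + k) - 2 ^ i = k := by omega
      rw [hk', hcor k (by omega), hxa, ← bsum_pow_add i k (by omega) a]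
    -- the value A computes for this mask
    have hsA : whileSum a (2 ^ i + k) 0 0 = bsum a (2 ^ i + k) := by
      rw [whileSum_eq]; simp
    -- the new table is still correct
    have hcor' : ∀ idx, idx < (sums ++ [bsum a (2 ^ i + k)]).length →
        (sums ++ [bsum a (2 ^ i + k)]).getD idx 0 = bsum a idx := by
      intro idx hidx
      simp only [List.length_append, List.length_cons, List.length_nil] at hidx
      by_cases h : idx < sums.length
      · rw [List.getD_eq_getElem?_getD, List.getElem?_append_left h,
          ← List.getD_eq_getElem?_getD]
        exact hcor idx h
      · have : idx = sums.length := by omega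
        subst this
        rw [List.getD_eq_getElem?_getD, List.getElem?_append_right (le_refl _)]
        simp [hlen]
    have hlen' : (sums ++ [bsum a (2 ^ i + k)]).length = 2 ^ i + (k + 1) := by
      simp only [List.length_append, List.length_cons, List.length_nil, hlen]
      omega
    have hrec := fun (f : PySem.Dict Int Nat) => ih (k + 1) (sums ++ [bsum a (2 ^ i + k)]) f rest hlen' (by omega) hcor'
    rw [hmask, List.cons_append]
    rw [loopA, loopInner]
    simp only [hs, hsA]
    have hre : 2 ^ i + k + 1 = 2 ^ i + (k + 1) := by omega
    cases hget : first.get? (bsum a (2 ^ i + k)) with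
    | none =>
      constructor
      · rw [hre, (hrec _).1]
      · intro sums' first' h
        rw [hre] at h
        have := (hrec _).2 sums' first' h
        exact ⟨by omega, this.2⟩
    | some prev =>
      by_cases hp : prev &&& (2 ^ i + k) == 0
      · simp [hp]
      · simp only [hp, Bool.false_eq_true, reduceIte]
        constructor
        · rw [hre, (hrec first).1]
        · intro sums' first' h
          rw [hre] at h
          have := (hrec first).2 sums' first' h
          exact ⟨by omega, this.2⟩

-- B's outer loop, started at level i with a correct table of size 2^i, agrees with
-- A's scan of the remaining masks
theorem outer_spec (a : List Int) (t : Nat) : ∀ (i : Nat) (sums : List Int)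
    (first : PySem.Dict Int Nat),
    sums.length = 2 ^ i →
    (∀ idx, idx < sums.length → sums.getD idx 0 = bsum a idx) →
    loopA a (List.range' (2 ^ i) (2 ^ (i + t) - 2 ^ i)) first =
      loopOuter a (List.range' i t) sums first := by
  induction t with
  | zero =>
    intro i sums first _ _
    simp [loopOuter, loopA]
  | succ t ih =>
    intro i sums first hlen hcor
    have hmono : 2 ^ (i + 1) ≤ 2 ^ (i + (t + 1)) := Nat.pow_le_pow_right (by omega) (by omega)
    have hpow : 2 ^ (i + 1) = 2 ^ i + 2 ^ i := by ring
    have he : 2 ^ (i + 1 + t) = 2 ^ (i + (t + 1)) := by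
      rw [show i + 1 + t = i + (t + 1) by omega]
    have hsplit : 2 ^ (i + (t + 1)) - 2 ^ i = 2 ^ i + (2 ^ (i + 1 + t) - 2 ^ (i + 1)) := by
      omega
    rw [hsplit, ← List.range'_append_1]
    have hinner := inner_spec a i (2 ^ i) 0 sums first
      (List.range' (2 ^ i + 2 ^ i) (2 ^ ((i + 1) + t) - 2 ^ (i + 1)))
      (by omega) (by omega) hcor
    rw [List.range'_succ, loopOuter]
    simp only [Nat.add_zero] at hinner
    rw [hinner.1]
    cases hloop : loopInner (PySem.List.pyGetD a (i : Int) 0) (2 ^ i)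
        (List.range' (2 ^ i) (2 ^ i)) sums first with
    | none => rfl
    | some p =>
      obtain ⟨sums', first'⟩ := p
      have hinv := hinner.2 sums' first' hloop
      have hl' : sums'.length = 2 ^ (i + 1) := by rw [hinv.1, hpow]; omega
      have hrec := ih (i + 1) sums' first' hl' hinv.2
      show loopA a (List.range' (2 ^ i + 2 ^ i) (2 ^ (i + 1 + t) - 2 ^ (i + 1))) first' =
        loopOuter a (List.range' (i + 1) t) sums' first'
      rw [← hpow]
      exact hrec

-- ===== VERDICT (by name: the statement is the Claim_ definition above) =====
theorem rule1_disjoint_spec : Claim_equal_rule1_disjoint := by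
  intro a _
  unfold Spec_rule1_disjoint rule1_disjoint rule1_disjoint_alt
  have h := outer_spec a a.length 0 [0] PySem.Dict.empty (by simp)
    (by intro idx hidx
        simp only [List.length_cons, List.length_nil] at hidx
        have : idx = 0 := by omega
        subst this
        simp [bsum_zero])
  simp only [pow_zero, Nat.zero_add] at h
  rw [← List.range_eq_range'] at h
  exact h
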